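-- pv_equiv track=rewrite | github.com/MinseokGo/AlgorismStudy-Alss | Kimjinwoo/pro.py | solution
-- ===== SOURCE A (Python) =====
-- def solution(info,query):
--     infosplit = []
--     querysplit = []
--     for i in info:
--         infosplit.append(i.split()) #info를 공백으로 구분
--     for i in range(len(query)):
--         q = query[i].replace("and", "").replace("  ", " ").split()
--         querysplit.append(q)
--         #[["-","backend",...],["-","-"...
--     result = [0 for i in range(len(query))]
--     for i in range(len(query)): #결과값의 수
--         for j in infosplit: #qurey마다 info의 list 개수만큼 비교
--             for k in range(len(j)): #infosplit list의 요소 개수만큼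
--                 if querysplit[i][k] == "-":
--                     continue
--                 elif k == 4:
--                     if int(j[k]) >= int(querysplit[i][k]):
--                         result[i] += 1
--                 elif j[k] != querysplit[i][k]:
--                     break
--
--     return result
-- ===== SOURCE B (Python) =====
-- def solution(info, query):
--     # Precompute an index once: every well-formed info row (5+ fields, integer
--     # score) is filed under the distinct wildcard combinations of its first four
--     # fields (16 keys, deduplicated so a literal "-" field is not double-filed);
--     # each query is then a single dictionary lookup plus a scan of the
--     # (typically small) matching bucket.  Malformed rows match nothing and
--     # malformed queries (no parsable score) match nothing.
--     db = {}
--     for row in info: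
--         t = row.split()
--         if len(t) < 5:
--             continue
--         try:
--             s = int(t[4])
--         except ValueError:
--             continue
--         f0, f1, f2, f3 = t[0], t[1], t[2], t[3]
--         keys = [("-" if m & 1 else f0,
--                  "-" if m & 2 else f1,
--                  "-" if m & 4 else f2,
--                  "-" if m & 8 else f3) for m in range(16)]
--         for key in dict.fromkeys(keys):
--             db.setdefault(key, []).append(s)
--     res = []
--     for q in query:
--         t = q.replace("and", "").replace("  ", " ").split()
--         if len(t) < 5:
--             res.append(0)
--             continue
--         try:
--             th = int(t[4])
--         except ValueError:
--             res.append(0)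
--             continue
--         res.append(sum(1 for s in db.get((t[0], t[1], t[2], t[3]), []) if s >= th))
--     return res
-- ===== Notes on version B (the rewrite author's own statement) =====
-- stated objective: faster
-- what changed: A rescans every info row (field by field, with break) for every query; B builds, in one pass over info, a dictionary from each row's distinct wildcard field-combinations to its scores, so each query is one hash lookup plus a scan of only the matching bucket.
import Mathlib
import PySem

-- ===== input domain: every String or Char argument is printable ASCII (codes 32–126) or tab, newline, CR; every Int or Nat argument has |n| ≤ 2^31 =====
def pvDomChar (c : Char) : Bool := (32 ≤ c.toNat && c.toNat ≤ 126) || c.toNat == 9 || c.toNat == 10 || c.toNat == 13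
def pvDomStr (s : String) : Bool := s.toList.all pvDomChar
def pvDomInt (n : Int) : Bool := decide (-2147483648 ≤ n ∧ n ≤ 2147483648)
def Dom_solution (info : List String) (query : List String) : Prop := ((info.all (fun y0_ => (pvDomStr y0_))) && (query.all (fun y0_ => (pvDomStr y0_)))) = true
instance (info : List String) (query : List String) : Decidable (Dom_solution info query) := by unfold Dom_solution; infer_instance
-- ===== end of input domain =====

-- B replaces A's per-query scan of all info rows by a dictionary precomputed once,
-- mapping each distinct wildcard combination of a row's four fields to its scores;
-- each query is then a single lookup plus a scan of its (typically small) bucket.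

-- ===== PORT A =====
-- body of A's innermost `for k in range(len(j))` loop; the Bool is the `break` flag
def aStep (q j : List String) (i : Int) (st : List Int × Bool) (k : Int) : List Int × Bool :=
  if st.2 then st
  else
    if PySem.List.pyGetD q k "" = "-" then st
    else if k = 4 then
      if (PySem.Int.ofStr? (PySem.List.pyGetD q k "")).getD 0 ≤
          (PySem.Int.ofStr? (PySem.List.pyGetD j k "")).getD 0 then
        (PySem.List.pySetD st.1 i (PySem.List.pyGetD st.1 i 0 + 1), false)
      else st
    else if PySem.List.pyGetD j k "" ≠ PySem.List.pyGetD q k "" then (st.1, true)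
    else st

def solution (info : List String) (query : List String) : List Int :=
  let infosplit := info.map (fun i => PySem.Str.split₀ i)
  let querysplit := (PySem.List.pyRange 0 (PySem.List.len query) 1).map (fun i =>
    PySem.Str.split₀ (PySem.Str.replace
      (PySem.Str.replace (PySem.List.pyGetD query i "") "and" "") "  " " "))
  let result : List Int := List.replicate query.length 0
  (PySem.List.pyRange 0 (PySem.List.len query) 1).foldl (fun result i =>
    infosplit.foldl (fun result j =>
      ((PySem.List.pyRange 0 (PySem.List.len j) 1).foldl
        (aStep (PySem.List.pyGetD querysplit i []) j i) (result, false)).1) result) result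

-- ===== PORT B =====
-- the info row's key for wildcard-mask m (bit set = that field replaced by "-")
def bKey (f0 f1 f2 f3 : String) (m : Int) : String × String × String × String :=
  ((if PySem.Int.band m 1 = 0 then f0 else "-"),
   (if PySem.Int.band m 2 = 0 then f1 else "-"),
   (if PySem.Int.band m 4 = 0 then f2 else "-"),
   (if PySem.Int.band m 8 = 0 then f3 else "-"))

-- files one well-formed info row (5+ fields, integer score) under its distinct wildcard
-- keys (Python: dict.fromkeys = PySem.List.dedup); malformed rows are skipped (continue)
def bIndexRow (db : PySem.Dict (String × String × String × String) (List Int))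
    (row : String) : PySem.Dict (String × String × String × String) (List Int) :=
  let t := PySem.Str.split₀ row
  if t.length < 5 then db
  else
    match PySem.Int.ofStr? (PySem.List.pyGetD t 4 "") with
    | none => db
    | some s =>
      (PySem.List.dedup ((PySem.List.pyRange 0 16 1).map
        (bKey (PySem.List.pyGetD t 0 "") (PySem.List.pyGetD t 1 "")
          (PySem.List.pyGetD t 2 "") (PySem.List.pyGetD t 3 "")))).foldl
        (fun db k => db.modify k [] (· ++ [s])) db

def solution_alt (info : List String) (query : List String) : List Int :=
  let db := info.foldl bIndexRow PySem.Dict.empty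
  query.foldl (fun res q =>
    let t := PySem.Str.split₀ (PySem.Str.replace (PySem.Str.replace q "and" "") "  " " ")
    res ++ [if 5 ≤ t.length then
        (match PySem.Int.ofStr? (PySem.List.pyGetD t 4 "") with
         | none => (0 : Int)
         | some th =>
           (db.getD (PySem.List.pyGetD t 0 "", PySem.List.pyGetD t 1 "",
              PySem.List.pyGetD t 2 "", PySem.List.pyGetD t 3 "") []).foldl
             (fun c s => if th ≤ s then c + 1 else c) 0)
      else (0 : Int)]) []

-- ===== PRECONDITION & SPEC =====
-- the token list A and B both parse from a query string
def toksQ (q : String) : List String :=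
  PySem.Str.split₀ (PySem.Str.replace (PySem.Str.replace q "and" "") "  " " ")

-- A's k-scan of info row j under query tokens q reaches index k (no earlier break)
def visitedTo (q j : List String) (k : Nat) : Bool :=
  (List.range k).all (fun k' => k' == 4 || q.getD k' "" == "-" || j.getD k' "" == q.getD k' "")

-- the scan of row j under query tokens q raises nothing: wherever it reaches, the
-- query token exists, and when position 4 is reached both score fields parse (or q[4] is "-")
def scanSafe (q j : List String) : Bool :=
  (List.range j.length).all (fun k => !(visitedTo q j k) ||
    (decide (k < q.length) &&
      (k != 4 || q.getD 4 "" == "-" ||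
        ((PySem.Int.ofStr? (j.getD 4 "")).isSome && (PySem.Int.ofStr? (q.getD 4 "")).isSome))))

-- Pre_ excludes exactly the inputs on which A raises: some row scan reads a missing
-- query token (IndexError) or reaches position 4 with an unparsable score field
-- (ValueError) — the closed-form scanSafe condition.
def Pre_solution (info : List String) (query : List String) : Prop :=
  ∀ q ∈ query, ∀ r ∈ info, scanSafe (toksQ q) (PySem.Str.split₀ r) = true
instance (info : List String) (query : List String) : Decidable (Pre_solution info query) := by
  unfold Pre_solution; infer_instance

def pvWitness_solution : List String × List String :=
  (["java backend junior pizza 150", "cpp frontend senior chicken 210"],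
   ["java and backend and junior and pizza 100", "- and - and - and - 200"])

def Spec_solution (info : List String) (query : List String) (out : List Int) : Prop := out = solution_alt info query
instance (info : List String) (query : List String) (out : List Int) : Decidable (Spec_solution info query out) := by unfold Spec_solution; infer_instance

-- ===== CLAIM (what is proved, stated in full; the proofs are below) =====
def Claim_equal_solution : Prop := ∀ (info : List String) (query : List String), Dom_solution info query → Pre_solution info query → Spec_solution info query (solution info query)

-- ===== LEMMAS AND PROOFS =====

-- the four wildcard field comparisons of A's scan, as one Bool
def match4B (q t : List String) : Bool :=
  ((q.getD 0 "" == "-") || (t.getD 0 "" == q.getD 0 "")) &&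
  ((q.getD 1 "" == "-") || (t.getD 1 "" == q.getD 1 "")) &&
  ((q.getD 2 "" == "-") || (t.getD 2 "" == q.getD 2 "")) &&
  ((q.getD 3 "" == "-") || (t.getD 3 "" == q.getD 3 ""))

-- A's per-row count condition (on the split query tokens q and split info row t)
def rowOKL (q t : List String) : Bool :=
  decide (5 ≤ t.length) && match4B q t && (!(q.getD 4 "" == "-")) &&
  decide ((PySem.Int.ofStr? (q.getD 4 "")).getD 0 ≤ (PySem.Int.ofStr? (t.getD 4 "")).getD 0)

-- once the break flag is set, A's k-loop does nothing more
lemma aFold_stop (q j : List String) (i : Int) (res : List Int) (ks : List Int) :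
    ks.foldl (aStep q j i) (res, true) = (res, true) := by
  induction ks with
  | nil => rfl
  | cons k ks ih => simpa [aStep] using ih

lemma aStep_cont (q j : List String) (i : Int) (res : List Int) (k : Int) (hk : k ≠ 4)
    (h : PySem.List.pyGetD q k "" = "-" ∨ PySem.List.pyGetD j k "" = PySem.List.pyGetD q k "") :
    aStep q j i (res, false) k = (res, false) := by
  rcases h with h | h <;> simp [aStep, h, hk]

lemma aStep_break (q j : List String) (i : Int) (res : List Int) (k : Int) (hk : k ≠ 4)
    (h1 : PySem.List.pyGetD q k "" ≠ "-") (h2 : PySem.List.pyGetD j k "" ≠ PySem.List.pyGetD q k "") :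
    aStep q j i (res, false) k = (res, true) := by
  simp [aStep, h1, h2, hk]

-- steps other than k = 4 never change the result list
lemma aStep_fst_ne4 (q j : List String) (i : Int) (st : List Int × Bool) (k : Int)
    (hk : k ≠ 4) : (aStep q j i st k).1 = st.1 := by
  simp only [aStep, if_neg hk]
  split_ifs <;> rfl

lemma fst_of_no4 (q j : List String) (i : Int) :
    ∀ (ks : List Int) (st : List Int × Bool), (∀ k ∈ ks, k ≠ 4) →
      (ks.foldl (aStep q j i) st).1 = st.1 := by
  intro ks
  induction ks with
  | nil => intro st _; rfl
  | cons k ks ih =>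
    intro st h
    rw [List.foldl_cons, ih _ (fun k' hk' => h k' (List.mem_cons_of_mem k hk')),
      aStep_fst_ne4 q j i st k (h k List.mem_cons_self)]

-- A's scan over positions 0..3: the break flag records the field mismatch
lemma prefix4 (q j : List String) (i : Int) (res : List Int) :
    (([0, 1, 2, 3] : List Int)).foldl (aStep q j i) (res, false) = (res, !(match4B q j)) := by
  have g0 := PySem.List.pyGetD_ofNat' q 0 ""
  have g1 := PySem.List.pyGetD_ofNat' q 1 ""
  have g2 := PySem.List.pyGetD_ofNat' q 2 ""
  have g3 := PySem.List.pyGetD_ofNat' q 3 ""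
  have j0 := PySem.List.pyGetD_ofNat' j 0 ""
  have j1 := PySem.List.pyGetD_ofNat' j 1 ""
  have j2 := PySem.List.pyGetD_ofNat' j 2 ""
  have j3 := PySem.List.pyGetD_ofNat' j 3 ""
  rw [List.foldl_cons]
  by_cases d0 : q.getD 0 "" = "-" ∨ j.getD 0 "" = q.getD 0 ""
  · rw [aStep_cont q j i res 0 (by decide) (by rw [g0, j0]; exact d0), List.foldl_cons]
    by_cases d1 : q.getD 1 "" = "-" ∨ j.getD 1 "" = q.getD 1 ""
    · rw [aStep_cont q j i res 1 (by decide) (by rw [g1, j1]; exact d1), List.foldl_cons]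
      by_cases d2 : q.getD 2 "" = "-" ∨ j.getD 2 "" = q.getD 2 ""
      · rw [aStep_cont q j i res 2 (by decide) (by rw [g2, j2]; exact d2), List.foldl_cons]
        by_cases d3 : q.getD 3 "" = "-" ∨ j.getD 3 "" = q.getD 3 ""
        · rw [aStep_cont q j i res 3 (by decide) (by rw [g3, j3]; exact d3), List.foldl_nil]
          have hm : match4B q j = true := by
            simp only [match4B, Bool.and_eq_true, Bool.or_eq_true, beq_iff_eq]
            tauto
          rw [hm, Bool.not_true]
        · rw [aStep_break q j i res 3 (by decide) (by rw [g3]; tauto) (by rw [g3, j3]; tauto),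
            aFold_stop]
          have hm : match4B q j = false := by
            rw [← Bool.not_eq_true]
            simp only [match4B, Bool.and_eq_true, Bool.or_eq_true, beq_iff_eq]
            tauto
          rw [hm, Bool.not_false]
      · rw [aStep_break q j i res 2 (by decide) (by rw [g2]; tauto) (by rw [g2, j2]; tauto),
          aFold_stop]
        have hm : match4B q j = false := by
          rw [← Bool.not_eq_true]
          simp only [match4B, Bool.and_eq_true, Bool.or_eq_true, beq_iff_eq]
          tauto
        rw [hm, Bool.not_false]
    · rw [aStep_break q j i res 1 (by decide) (by rw [g1]; tauto) (by rw [g1, j1]; tauto),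
        aFold_stop]
      have hm : match4B q j = false := by
        rw [← Bool.not_eq_true]
        simp only [match4B, Bool.and_eq_true, Bool.or_eq_true, beq_iff_eq]
        tauto
      rw [hm, Bool.not_false]
  · rw [aStep_break q j i res 0 (by decide) (by rw [g0]; tauto) (by rw [g0, j0]; tauto),
      aFold_stop]
    have hm : match4B q j = false := by
      rw [← Bool.not_eq_true]
      simp only [match4B, Bool.and_eq_true, Bool.or_eq_true, beq_iff_eq]
      tauto
    rw [hm, Bool.not_false]

lemma bump_bump (res : List Int) (n : Nat) (a b : Int) :
    PySem.List.pySetD (PySem.List.pySetD res (n : Int) a) (n : Int) b = PySem.List.pySetD res (n : Int) b := by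
  simp [PySem.List.pySetD_natCast, List.set_set]

-- generic: fold of conditional bumps at one fixed in-range index
lemma bumpFold (p : List String → Bool) (n : Nat) :
    ∀ (rows : List (List String)) (res : List Int), n < res.length →
    rows.foldl (fun res j => if p j then
        PySem.List.pySetD res (n : Int) (PySem.List.pyGetD res (n : Int) 0 + 1) else res) res =
    PySem.List.pySetD res (n : Int)
      (PySem.List.pyGetD res (n : Int) 0 + (rows.countP p : Int)) := by
  intro rows
  induction rows with
  | nil =>
    intro res hn
    rw [List.foldl_nil, List.countP_nil, PySem.List.pySetD_natCast, PySem.List.pyGetD_natCast]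
    push_cast
    rw [add_zero, List.getD_eq_getElem _ _ hn, List.set_getElem_self]
  | cons j rows ih =>
    intro res hn
    by_cases hj : p j
    · rw [List.foldl_cons, if_pos hj,
        ih _ (by rw [PySem.List.length_pySetD]; exact hn)]
      rw [PySem.List.pyGetD_pySetD_natCast _ _ _ _ _ hn, if_pos rfl, bump_bump,
        List.countP_cons]
      simp only [hj]
      push_cast; ring_nf
    · rw [List.foldl_cons, if_neg hj, ih _ hn, List.countP_cons]
      simp [hj]

-- value of A's k-loop on an arbitrary info row
lemma aRow_eq (q j : List String) (res : List Int) (i : Int) :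
    ((PySem.List.pyRange 0 (PySem.List.len j) 1).foldl (aStep q j i) (res, false)).1 =
    if rowOKL q j then PySem.List.pySetD res i (PySem.List.pyGetD res i 0 + 1) else res := by
  rw [PySem.List.len_eq]
  by_cases h5 : 5 ≤ j.length
  · have e1 : PySem.List.pyRange 0 (j.length : Int) 1 =
        ([0, 1, 2, 3] ++ [4]) ++ PySem.List.pyRange 5 (j.length : Int) 1 := by
      rw [PySem.List.pyRange_one_append 0 5 (j.length : Int) (by omega) (by exact_mod_cast h5),
        show PySem.List.pyRange 0 5 1 = ([0, 1, 2, 3] ++ [4]) from by decide]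
    have hno4 : ∀ k ∈ PySem.List.pyRange 5 (j.length : Int) 1, k ≠ 4 := by
      intro k hk
      rw [PySem.List.mem_pyRange_one] at hk
      omega
    rw [e1, List.foldl_append, List.foldl_append, prefix4]
    have g4 := PySem.List.pyGetD_ofNat' q 4 ""
    have j4 := PySem.List.pyGetD_ofNat' j 4 ""
    by_cases hm : match4B q j = true
    · rw [hm, Bool.not_true, List.foldl_cons, List.foldl_nil]
      by_cases h4 : q[4]?.getD "" = "-"
      · rw [show aStep q j i (res, false) 4 = (res, false) from by simp [aStep, g4, h4],
          fst_of_no4 q j i _ _ hno4, if_neg (by simp [rowOKL, List.getD, h4])]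
      · by_cases hth : (PySem.Int.ofStr? (q[4]?.getD "")).getD 0 ≤
            (PySem.Int.ofStr? (j[4]?.getD "")).getD 0
        · rw [show aStep q j i (res, false) 4 =
              (PySem.List.pySetD res i (PySem.List.pyGetD res i 0 + 1), false) from by
                simp [aStep, g4, j4, h4, hth],
            fst_of_no4 q j i _ _ hno4, if_pos (by simp [rowOKL, List.getD, h5, hm, h4, hth])]
        · rw [show aStep q j i (res, false) 4 = (res, false) from by
              simp [aStep, g4, j4, h4, hth],
            fst_of_no4 q j i _ _ hno4, if_neg (by simp [rowOKL, List.getD, hth])]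
    · rw [Bool.not_eq_true] at hm
      rw [hm, Bool.not_false, aFold_stop, aFold_stop, if_neg (by simp [rowOKL, hm])]
  · have hno4 : ∀ k ∈ PySem.List.pyRange 0 (j.length : Int) 1, k ≠ 4 := by
      intro k hk
      rw [PySem.List.mem_pyRange_one] at hk
      omega
    rw [fst_of_no4 q j i _ _ hno4, if_neg (by simp [rowOKL, h5])]

-- A's j-loop: each matching row bumps result[i] once
lemma aInfoFold (rows : List (List String)) (q : List String) (n : Nat) (res : List Int)
    (hn : n < res.length) :
    rows.foldl (fun res j =>
      ((PySem.List.pyRange 0 (PySem.List.len j) 1).foldl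
        (aStep q j (n : Int)) (res, false)).1) res =
    PySem.List.pySetD res (n : Int)
      (PySem.List.pyGetD res (n : Int) 0 + (rows.countP (rowOKL q) : Int)) := by
  rw [PySem.List.foldl_congr_mem' rows _ (fun res j => if rowOKL q j then
        PySem.List.pySetD res (n : Int) (PySem.List.pyGetD res (n : Int) 0 + 1) else res) res
      (fun j _ res => aRow_eq q j res (n : Int))]
  exact bumpFold (rowOKL q) n rows res hn

-- A's i-loop updates each slot independently
lemma aOuter (N : Nat) (f : List Int → Int → List Int) (c : Nat → Int)
    (hf : ∀ (res : List Int) (i : Nat), res.length = N → i < N →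
      f res (i : Int) = PySem.List.pySetD res (i : Int) (PySem.List.pyGetD res (i : Int) 0 + c i)) :
    ∀ (m : Nat) (res : List Int), res.length = N → m ≤ N →
      (PySem.List.pyRange 0 (m : Int) 1).foldl f res =
      (List.range N).map (fun k => if k < m then res.getD k 0 + c k else res.getD k 0) := by
  intro m
  induction m with
  | zero =>
    intro res hlen _
    rw [Nat.cast_zero, PySem.List.pyRange_one_eq_nil le_rfl, List.foldl_nil]
    symm
    apply List.ext_getElem (by simp [hlen])
    intro k hk hk'
    simp only [List.getElem_map, List.getElem_range]
    rw [if_neg (Nat.not_lt_zero k), List.getD_eq_getElem res 0 (by omega)]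
  | succ m ih =>
    intro res hlen hm
    have h0m : (0 : Int) ≤ (m : Int) := by positivity
    rw [Nat.cast_succ, PySem.List.pyRange_one_succ_right h0m, List.foldl_append,
      List.foldl_cons, List.foldl_nil, ih res hlen (by omega)]
    set L := (List.range N).map (fun k => if k < m then res.getD k 0 + c k else res.getD k 0) with hL
    have hLlen : L.length = N := by simp [hL]
    rw [hf L m hLlen (by omega)]
    have hgd : PySem.List.pyGetD L (m : Int) 0 = res.getD m 0 := by
      rw [PySem.List.pyGetD_natCast, List.getD_eq_getElem L 0 (by omega)]
      simp only [hL, List.getElem_map, List.getElem_range]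
      exact if_neg (lt_irrefl m)
    rw [hgd, PySem.List.pySetD_natCast]
    apply List.ext_getElem (by simp [hL])
    intro k hk hk'
    rw [List.getElem_set]
    by_cases hkm : m = k
    · subst hkm
      rw [if_pos rfl]
      simp only [List.getElem_map, List.getElem_range]
      rw [if_pos (by omega)]
    · rw [if_neg hkm]
      simp only [hL, List.getElem_map, List.getElem_range]
      by_cases h1 : k < m
      · rw [if_pos h1, if_pos (by omega)]
      · rw [if_neg h1, if_neg (by omega)]

-- A's whole result, as a map over the queries
lemma solution_eq_map (info query : List String) :
    solution info query =
      query.map (fun q => ((info.map PySem.Str.split₀).countP (rowOKL (toksQ q)) : Int)) := by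
  unfold solution
  simp only [PySem.List.len_eq]
  set N := query.length with hN
  set infosplit := info.map (fun i => PySem.Str.split₀ i) with hIS
  set querysplit := (PySem.List.pyRange 0 (N : Int) 1).map (fun i =>
    PySem.Str.split₀ (PySem.Str.replace
      (PySem.Str.replace (PySem.List.pyGetD query i "") "and" "") "  " " ")) with hQS
  set c : Nat → Int :=
    fun k => (infosplit.countP (rowOKL (toksQ (query.getD k ""))) : Int) with hc
  have hf : ∀ (res : List Int) (i : Nat), res.length = N → i < N →
      infosplit.foldl (fun result j =>
        ((PySem.List.pyRange 0 (PySem.List.len j) 1).foldl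
          (aStep (PySem.List.pyGetD querysplit (i : Int) []) j (i : Int)) (result, false)).1) res =
      PySem.List.pySetD res (i : Int) (PySem.List.pyGetD res (i : Int) 0 + c i) := by
    intro res i hlen hi
    have hq : PySem.List.pyGetD querysplit (i : Int) [] = toksQ (query.getD i "") := by
      rw [hQS, PySem.List.pyGetD_map_pyRange_of_nonneg _ _ _ _ (by positivity)
        (by exact_mod_cast hi), PySem.List.pyGetD_natCast]
      rfl
    rw [hq, aInfoFold infosplit (toksQ (query.getD i "")) i res (by omega)]
  rw [aOuter N _ c hf N (List.replicate N 0) (by simp) le_rfl]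
  apply List.ext_getElem (by simp [hN])
  intro k hk hk'
  simp only [List.getElem_map, List.getElem_range]
  rw [if_pos (show k < N by have h := hk'; simp only [List.length_map] at h; omega),
    List.getD_replicate, zero_add, hc]
  have hqk : query.getD k "" = query[k]'(by simpa using hk') :=
    List.getD_eq_getElem query "" (by simpa using hk')
  simp only []
  rw [hqk]
  simp only [List.length_map] at hk'
  omega

-- scores attached to a constant second component
lemma filter_map_pair (ks : List (String × String × String × String)) (s : Int)
    (c : String × String × String × String) :
    ((ks.map (fun k => (k, s))).filter (fun p => p.1 == c)).map (·.2) =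
    List.replicate (ks.countP (· == c)) s := by
  induction ks with
  | nil => rfl
  | cons k ks ih =>
    by_cases h : (k == c) = true <;> simp [h, ih, List.replicate_succ]

-- the query key is among a row's 16 wildcard keys iff A's four field comparisons succeed
lemma mem_keys16 (f0 f1 f2 f3 c0 c1 c2 c3 : String) :
    ((c0, c1, c2, c3) ∈ (PySem.List.pyRange 0 16 1).map (bKey f0 f1 f2 f3)) ↔
    (("-" = c0 ∨ f0 = c0) ∧ ("-" = c1 ∨ f1 = c1) ∧ ("-" = c2 ∨ f2 = c2) ∧ ("-" = c3 ∨ f3 = c3)) := by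
  have hexp : (PySem.List.pyRange 0 16 1).map (bKey f0 f1 f2 f3) = [(f0, f1, f2, f3), ("-", f1, f2, f3), (f0, "-", f2, f3), ("-", "-", f2, f3), (f0, f1, "-", f3), ("-", f1, "-", f3), (f0, "-", "-", f3), ("-", "-", "-", f3), (f0, f1, f2, "-"), ("-", f1, f2, "-"), (f0, "-", f2, "-"), ("-", "-", f2, "-"), (f0, f1, "-", "-"), ("-", f1, "-", "-"), (f0, "-", "-", "-"), ("-", "-", "-", "-")] := rfl
  rw [hexp]
  simp only [List.mem_cons, List.not_mem_nil, or_false, Prod.mk.injEq]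
  constructor
  · rintro (⟨rfl, rfl, rfl, rfl⟩ | ⟨rfl, rfl, rfl, rfl⟩ | ⟨rfl, rfl, rfl, rfl⟩ |
      ⟨rfl, rfl, rfl, rfl⟩ | ⟨rfl, rfl, rfl, rfl⟩ | ⟨rfl, rfl, rfl, rfl⟩ |
      ⟨rfl, rfl, rfl, rfl⟩ | ⟨rfl, rfl, rfl, rfl⟩ | ⟨rfl, rfl, rfl, rfl⟩ |
      ⟨rfl, rfl, rfl, rfl⟩ | ⟨rfl, rfl, rfl, rfl⟩ | ⟨rfl, rfl, rfl, rfl⟩ |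
      ⟨rfl, rfl, rfl, rfl⟩ | ⟨rfl, rfl, rfl, rfl⟩ | ⟨rfl, rfl, rfl, rfl⟩ |
      ⟨rfl, rfl, rfl, rfl⟩) <;> simp
  · rintro ⟨rfl | rfl, rfl | rfl, rfl | rfl, rfl | rfl⟩ <;> simp

-- among a row's DISTINCT wildcard keys the query key occurs once if it matches, else not at all
lemma bRow_countP (f0 f1 f2 f3 c0 c1 c2 c3 : String) :
    (PySem.List.dedup ((PySem.List.pyRange 0 16 1).map (bKey f0 f1 f2 f3))).countP
      (· == (c0, c1, c2, c3)) =
    (if (("-" == c0) || (f0 == c0)) && (("-" == c1) || (f1 == c1)) &&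
        (("-" == c2) || (f2 == c2)) && (("-" == c3) || (f3 == c3)) then 1 else 0) := by
  have hmem : ((c0, c1, c2, c3) ∈ PySem.List.dedup ((PySem.List.pyRange 0 16 1).map (bKey f0 f1 f2 f3))) ↔
      ((("-" == c0) || (f0 == c0)) && (("-" == c1) || (f1 == c1)) &&
       (("-" == c2) || (f2 == c2)) && (("-" == c3) || (f3 == c3))) = true := by
    rw [PySem.List.mem_dedup, mem_keys16]
    simp only [Bool.and_eq_true, Bool.or_eq_true, beq_iff_eq]
    tauto
  set L := PySem.List.dedup ((PySem.List.pyRange 0 16 1).map (bKey f0 f1 f2 f3)) with hL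
  have hnd : L.Nodup := PySem.List.nodup_dedup _
  rw [← List.count_eq_countP]
  cases hc : (("-" == c0) || (f0 == c0)) && (("-" == c1) || (f1 == c1)) &&
      (("-" == c2) || (f2 == c2)) && (("-" == c3) || (f3 == c3)) with
  | true =>
    rw [if_pos rfl]
    have h1 : 0 < L.count (c0, c1, c2, c3) := List.count_pos_iff.mpr (hmem.mpr hc)
    have h2 : L.count (c0, c1, c2, c3) ≤ 1 := List.nodup_iff_count_le_one.mp hnd _
    omega
  | false =>
    rw [if_neg (by decide), List.count_eq_zero]
    intro hmm
    have h := hmem.mp hmm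
    rw [h] at hc
    exact absurd hc (by decide)

-- the bucket stored under any key after indexing all rows
set_option maxHeartbeats 2000000 in
lemma bucket_eq (info : List String)
    (db : PySem.Dict (String × String × String × String) (List Int)) (c0 c1 c2 c3 : String) :
    (info.foldl bIndexRow db).getD (c0, c1, c2, c3) [] =
    db.getD (c0, c1, c2, c3) [] ++ info.flatMap (fun r =>
      if 5 ≤ (PySem.Str.split₀ r).length then
        (match PySem.Int.ofStr? ((PySem.Str.split₀ r).getD 4 "") with
         | none => []
         | some s =>
           if (("-" == c0) || ((PySem.Str.split₀ r).getD 0 "" == c0)) &&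
              (("-" == c1) || ((PySem.Str.split₀ r).getD 1 "" == c1)) &&
              (("-" == c2) || ((PySem.Str.split₀ r).getD 2 "" == c2)) &&
              (("-" == c3) || ((PySem.Str.split₀ r).getD 3 "" == c3)) then [s] else [])
      else []) := by
  induction info generalizing db with
  | nil => simp
  | cons r rest ih =>
    set t := PySem.Str.split₀ r with hT
    have g0 := PySem.List.pyGetD_ofNat' t 0 ""
    have g1 := PySem.List.pyGetD_ofNat' t 1 ""
    have g2 := PySem.List.pyGetD_ofNat' t 2 ""
    have g3 := PySem.List.pyGetD_ofNat' t 3 ""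
    have g4 := PySem.List.pyGetD_ofNat' t 4 ""
    have hb : (bIndexRow db r).getD (c0, c1, c2, c3) [] =
        db.getD (c0, c1, c2, c3) [] ++
        (if 5 ≤ t.length then
          (match PySem.Int.ofStr? (t.getD 4 "") with
           | none => []
           | some s =>
             if (("-" == c0) || (t.getD 0 "" == c0)) && (("-" == c1) || (t.getD 1 "" == c1)) &&
                (("-" == c2) || (t.getD 2 "" == c2)) && (("-" == c3) || (t.getD 3 "" == c3)) then
               [s] else [])
        else []) := by
      by_cases h5 : t.length < 5
      · rw [show bIndexRow db r = db from by simp [bIndexRow, ← hT, h5],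
          if_neg (by omega), List.append_nil]
      · have h5' : 5 ≤ t.length := by omega
        rw [if_pos h5']
        cases hp : PySem.Int.ofStr? (t.getD 4 "") with
        | none =>
          rw [show bIndexRow db r = db from by
            simp only [bIndexRow, ← hT, if_neg h5, g4, hp], List.append_nil]
        | some s =>
          have hstep : bIndexRow db r =
              ((PySem.List.dedup ((PySem.List.pyRange 0 16 1).map
                  (bKey (t.getD 0 "") (t.getD 1 "") (t.getD 2 "") (t.getD 3 "")))).map
                (fun k => (k, s))).foldl
                (fun d p => d.modify p.1 [] (· ++ [p.2])) db := by
            simp only [bIndexRow, ← hT, if_neg h5, g0, g1, g2, g3, g4, hp]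
            exact (List.foldl_map
              (f := fun k => (k, s))
              (g := fun d p => PySem.Dict.modify d p.1 [] (· ++ [p.2]))
              (l := PySem.List.dedup ((PySem.List.pyRange 0 16 1).map
                (bKey (t.getD 0 "") (t.getD 1 "") (t.getD 2 "") (t.getD 3 ""))))
              (init := db)).symm
          rw [hstep, PySem.Dict.getD_foldl_modify_append, filter_map_pair, bRow_countP]
          show _ = db.getD (c0, c1, c2, c3) [] ++
            (if ((("-" == c0) || (t.getD 0 "" == c0)) && (("-" == c1) || (t.getD 1 "" == c1)) &&
              (("-" == c2) || (t.getD 2 "" == c2)) && (("-" == c3) || (t.getD 3 "" == c3))) = true then [s] else [])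
          by_cases hC : ((("-" == c0) || (t.getD 0 "" == c0)) && (("-" == c1) || (t.getD 1 "" == c1)) &&
              (("-" == c2) || (t.getD 2 "" == c2)) && (("-" == c3) || (t.getD 3 "" == c3))) = true
          · rw [if_pos hC, if_pos hC, List.replicate_one]
          · rw [if_neg hC, if_neg hC, List.replicate_zero]
    rw [List.foldl_cons, List.flatMap_cons, ih (bIndexRow db r), hb, List.append_assoc]

-- the k = 4 clause of scanSafe, for a row whose first four fields match
lemma safe4 (q j : List String) (hs : scanSafe q j = true) (h5 : 5 ≤ j.length)
    (hm : match4B q j = true) :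
    4 < q.length ∧ (q.getD 4 "" = "-" ∨
      ((PySem.Int.ofStr? (j.getD 4 "")).isSome = true ∧
       (PySem.Int.ofStr? (q.getD 4 "")).isSome = true)) := by
  have h := List.all_eq_true.mp hs 4 (List.mem_range.mpr (by omega))
  have hv : visitedTo q j 4 = true := by
    simp only [visitedTo, List.all_eq_true, List.mem_range]
    intro k' hk'
    simp only [match4B, Bool.and_eq_true, Bool.or_eq_true, beq_iff_eq] at hm
    interval_cases k' <;> simp only [Bool.or_eq_true, beq_iff_eq] <;> tauto
  rw [hv] at h
  simp only [Bool.not_true, Bool.false_or, Bool.and_eq_true, Bool.or_eq_true,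
    decide_eq_true_eq, beq_iff_eq] at h
  obtain ⟨h1, h2⟩ := h
  refine ⟨h1, ?_⟩
  rcases h2 with (h2 | h2) | h2
  · exact absurd h2 (by decide)
  · exact Or.inl h2
  · exact Or.inr h2

-- B's whole result, as a map over the queries
set_option maxHeartbeats 1000000 in
lemma solution_alt_eq_map (info query : List String) (hPre : Pre_solution info query) :
    solution_alt info query =
      query.map (fun q => ((info.map PySem.Str.split₀).countP (rowOKL (toksQ q)) : Int)) := by
  have hSafe := hPre
  unfold solution_alt
  rw [PySem.List.foldl_append_singleton_eq_map (fun q =>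
      if 5 ≤ (PySem.Str.split₀ (PySem.Str.replace (PySem.Str.replace q "and" "") "  " " ")).length then
        (match PySem.Int.ofStr? (PySem.List.pyGetD (PySem.Str.split₀ (PySem.Str.replace (PySem.Str.replace q "and" "") "  " " ")) 4 "") with
         | none => (0 : Int)
         | some th =>
           ((info.foldl bIndexRow PySem.Dict.empty).getD
              (PySem.List.pyGetD (PySem.Str.split₀ (PySem.Str.replace (PySem.Str.replace q "and" "") "  " " ")) 0 "",
               PySem.List.pyGetD (PySem.Str.split₀ (PySem.Str.replace (PySem.Str.replace q "and" "") "  " " ")) 1 "",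
               PySem.List.pyGetD (PySem.Str.split₀ (PySem.Str.replace (PySem.Str.replace q "and" "") "  " " ")) 2 "",
               PySem.List.pyGetD (PySem.Str.split₀ (PySem.Str.replace (PySem.Str.replace q "and" "") "  " " ")) 3 "") []).foldl
             (fun c s => if th ≤ s then c + 1 else c) 0)
      else (0 : Int)) query [], List.nil_append]
  apply List.map_congr_left
  intro q hq
  have hT : PySem.Str.split₀ (PySem.Str.replace (PySem.Str.replace q "and" "") "  " " ") = toksQ q := rfl
  rw [hT]
  have g0 := PySem.List.pyGetD_ofNat' (toksQ q) 0 ""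
  have g1 := PySem.List.pyGetD_ofNat' (toksQ q) 1 ""
  have g2 := PySem.List.pyGetD_ofNat' (toksQ q) 2 ""
  have g3 := PySem.List.pyGetD_ofNat' (toksQ q) 3 ""
  have g4 := PySem.List.pyGetD_ofNat' (toksQ q) 4 ""
  rw [g0, g1, g2, g3, g4]
  by_cases h5 : 5 ≤ (toksQ q).length
  · rw [if_pos h5]
    cases hp : PySem.Int.ofStr? ((toksQ q).getD 4 "") with
    | none =>
      show (0 : Int) = _
      symm
      rw [Nat.cast_eq_zero, List.countP_eq_zero]
      intro t' ht'
      obtain ⟨r, hr, rfl⟩ := List.mem_map.mp ht'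
      rw [Bool.not_eq_true, ← Bool.not_eq_true]
      intro hro
      simp only [rowOKL, Bool.and_eq_true, decide_eq_true_eq, Bool.not_eq_eq_eq_not,
        Bool.not_true, beq_eq_false_iff_ne, ne_eq] at hro
      obtain ⟨⟨⟨h5r, hm⟩, hq4⟩, _⟩ := hro
      rcases (safe4 (toksQ q) (PySem.Str.split₀ r) (hSafe q hq r hr) h5r hm).2 with h | h
      · exact hq4 h
      · rw [hp] at h
        exact absurd h.2 (by decide)
    | some th =>
      show ((info.foldl bIndexRow PySem.Dict.empty).getD
          ((toksQ q).getD 0 "", (toksQ q).getD 1 "", (toksQ q).getD 2 "", (toksQ q).getD 3 "") []).foldl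
          (fun c s => if th ≤ s then c + 1 else c) 0 = _
      rw [bucket_eq info PySem.Dict.empty, PySem.Dict.getD_empty,
        List.nil_append, PySem.List.foldl_ite_add_one (fun s => th ≤ s), zero_add,
        List.countP_flatMap]
      have hb : ∀ a b : String, (a == b) = (b == a) := fun a b => by
        by_cases h : a = b
        · subst h; rfl
        · rw [beq_eq_false_iff_ne.mpr h, beq_eq_false_iff_ne.mpr (Ne.symm h)]
      have hq4 : (toksQ q).getD 4 "" ≠ "-" := by
        intro h
        rw [h, show PySem.Int.ofStr? "-" = (none : Option Int) from by decide] at hp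
        simp at hp
      rw [List.map_congr_left (g := fun r => if rowOKL (toksQ q) (PySem.Str.split₀ r) then 1 else 0)
        (fun r hr => by
          simp only [Function.comp_apply]
          by_cases h5r : 5 ≤ (PySem.Str.split₀ r).length
          · rw [if_pos h5r]
            cases hpr : PySem.Int.ofStr? ((PySem.Str.split₀ r).getD 4 "") with
            | none =>
              have hro : rowOKL (toksQ q) (PySem.Str.split₀ r) = false := by
                rw [← Bool.not_eq_true]
                intro hro
                simp only [rowOKL, Bool.and_eq_true, decide_eq_true_eq] at hro
                obtain ⟨⟨⟨_, hm⟩, _⟩, _⟩ := hro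
                rcases (safe4 (toksQ q) (PySem.Str.split₀ r) (hSafe q hq r hr) h5r hm).2 with h | h
                · exact hq4 h
                · rw [hpr] at h
                  exact absurd h.1 (by decide)
              rw [hro]
              rfl
            | some s =>
              rw [rowOKL, match4B, hb "-" ((toksQ q).getD 0 ""), hb "-" ((toksQ q).getD 1 ""),
                hb "-" ((toksQ q).getD 2 ""), hb "-" ((toksQ q).getD 3 ""), hp, hpr]
              simp only [Option.getD_some, decide_eq_true h5r, Bool.true_and,
                (show (!((toksQ q).getD 4 "" == "-")) = true by
                  simp only [Bool.not_eq_eq_eq_not, Bool.not_true, beq_eq_false_iff_ne, ne_eq]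
                  exact hq4), Bool.and_true]
              generalize ((((toksQ q).getD 0 "" == "-") || ((PySem.Str.split₀ r).getD 0 "" == (toksQ q).getD 0 "")) &&
                  (((toksQ q).getD 1 "" == "-") || ((PySem.Str.split₀ r).getD 1 "" == (toksQ q).getD 1 "")) &&
                  (((toksQ q).getD 2 "" == "-") || ((PySem.Str.split₀ r).getD 2 "" == (toksQ q).getD 2 "")) &&
                  (((toksQ q).getD 3 "" == "-") || ((PySem.Str.split₀ r).getD 3 "" == (toksQ q).getD 3 ""))) = a
              by_cases hle : th ≤ s <;> cases a <;> simp [hle]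
          · rw [if_neg h5r, show rowOKL (toksQ q) (PySem.Str.split₀ r) = false from by
              simp [rowOKL, h5r]]
            rfl)]
      rw [List.countP_map]
      have hsum : ∀ l : List String,
          (l.map (fun r => if rowOKL (toksQ q) (PySem.Str.split₀ r) then 1 else 0)).sum =
          l.countP (fun r => rowOKL (toksQ q) (PySem.Str.split₀ r)) := by
        intro l
        induction l with
        | nil => rfl
        | cons x xs ih => by_cases h : rowOKL (toksQ q) (PySem.Str.split₀ x) <;>
            simp [h, ih, Nat.add_comm]
      rw [hsum]
      simp only [Function.comp_def]
  · rw [if_neg h5]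
    symm
    rw [Nat.cast_eq_zero, List.countP_eq_zero]
    intro t' ht'
    obtain ⟨r, hr, rfl⟩ := List.mem_map.mp ht'
    rw [Bool.not_eq_true, ← Bool.not_eq_true]
    intro hro
    simp only [rowOKL, Bool.and_eq_true, decide_eq_true_eq] at hro
    obtain ⟨⟨⟨h5r, hm⟩, _⟩, _⟩ := hro
    have h4lt := (safe4 (toksQ q) (PySem.Str.split₀ r) (hSafe q hq r hr) h5r hm).1
    exact h5 (by omega)

-- ===== VERDICT (by name: the statement is the Claim_ definition above) =====
theorem solution_spec : Claim_equal_solution := by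
  intro info query _hDom hPre
  unfold Spec_solution
  rw [solution_eq_map info query, solution_alt_eq_map info query hPre]
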